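-- pv_equiv track=rewrite | github.com/mashleburneded/Mobby | src/input_validator.py | _find_similar_values
-- ===== SOURCE A (Python) =====
-- from typing import Dict, Any, List, Optional, Tuple
--
-- def _find_similar_values(input_value: str, valid_values: List[str], max_distance: int = 2) -> List[str]:
--     """Find similar values using simple string distance"""
--     def levenshtein_distance(s1: str, s2: str) -> int:
--         if len(s1) < len(s2):
--             return levenshtein_distance(s2, s1)
--
--         if len(s2) == 0:
--             return len(s1)
--
--         previous_row = list(range(len(s2) + 1))
--         for i, c1 in enumerate(s1):
--             current_row = [i + 1]
--             for j, c2 in enumerate(s2):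
--                 insertions = previous_row[j + 1] + 1
--                 deletions = current_row[j] + 1
--                 substitutions = previous_row[j] + (c1 != c2)
--                 current_row.append(min(insertions, deletions, substitutions))
--             previous_row = current_row
--
--         return previous_row[-1]
--
--     similar = []
--     input_lower = input_value.lower()
--
--     for value in valid_values:
--         value_lower = value.lower()
--         distance = levenshtein_distance(input_lower, value_lower)
--
--         # Also check if input is a substring or starts with the value
--         if (distance <= max_distance or
--             input_lower in value_lower or
--             value_lower.startswith(input_lower)):
--             similar.append((value, distance))
--
--     # Sort by distance and return values
--     similar.sort(key=lambda x: x[1])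
--     return [value for value, _ in similar[:5]]
-- ===== SOURCE B (Python) =====
-- from typing import List
--
-- def _find_similar_values(input_value: str, valid_values: List[str], max_distance: int = 2) -> List[str]:
--     """Find similar values: single-array in-place edit distance + counting-bucket selection (no sort)."""
--     input_lower = input_value.lower()
--
--     def distance(a: str, b: str) -> int:
--         # one column, updated in place while scanning b; no length swap, no per-row allocation
--         col = list(range(len(a) + 1))
--         for j, cb in enumerate(b):
--             prev = col[0]
--             col[0] = j + 1
--             for i, ca in enumerate(a):
--                 cur = min(col[i + 1] + 1, col[i] + 1, prev + (ca != cb))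
--                 prev = col[i + 1]
--                 col[i + 1] = cur
--         return col[-1]
--
--     matches = []
--     max_seen = 0
--     for value in valid_values:
--         value_lower = value.lower()
--         d = distance(input_lower, value_lower)
--         if d <= max_distance or input_lower in value_lower or value_lower.startswith(input_lower):
--             matches.append((value, d))
--             max_seen = max(max_seen, d)
--
--     # counting-bucket selection: emit matches grouped by distance, ascending; stable within a bucket
--     result = []
--     for d in range(max_seen + 1):
--         for value, dd in matches:
--             if dd == d:
--                 result.append(value)
--     return result[:5]
-- ===== Notes on version B (the rewrite author's own statement) =====
-- stated objective: alternative
-- what changed: The two-row append-built Levenshtein DP with a length swap is replaced by a single column updated in place with a diagonal register (no swap, no per-row allocation), and the stable sort-by-distance plus slice is replaced by a counting-bucket selection that emits matches grouped by ascending distance.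
import Mathlib
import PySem

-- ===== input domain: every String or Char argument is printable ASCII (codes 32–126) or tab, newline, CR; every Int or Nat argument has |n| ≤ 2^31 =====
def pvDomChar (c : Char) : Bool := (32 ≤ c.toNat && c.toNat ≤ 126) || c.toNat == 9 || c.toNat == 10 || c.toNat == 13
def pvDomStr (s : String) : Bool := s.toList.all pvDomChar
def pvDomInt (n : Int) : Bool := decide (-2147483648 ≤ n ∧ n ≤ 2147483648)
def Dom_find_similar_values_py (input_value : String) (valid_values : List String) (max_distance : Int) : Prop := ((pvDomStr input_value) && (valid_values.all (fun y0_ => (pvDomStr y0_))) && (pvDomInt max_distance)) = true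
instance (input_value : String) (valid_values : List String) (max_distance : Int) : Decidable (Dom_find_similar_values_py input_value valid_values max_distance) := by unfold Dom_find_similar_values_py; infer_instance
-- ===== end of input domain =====

-- B replaces A's two-row Levenshtein DP (with length swap) by a single in-place column with a
-- diagonal register, and replaces the stable sort-by-distance + slice by a counting-bucket pass
-- (objective: alternative; the return value is proved identical on all inputs).

-- ===== PORT A =====
-- A's inner loop body: 'for j, c2 in enumerate(s2): ... current_row.append(min(...))'
-- (list indices prev[j+1], cur[j], prev[j], row[-1] are always in range, so pyGetD _ _ 0 is exact)
def innerStepA (prev : List Int) (c1 : Char) (cur : List Int) (cj : Char × Nat) : List Int :=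
  let insertions := PySem.List.pyGetD prev ((cj.2 : Int) + 1) 0 + 1
  let deletions := PySem.List.pyGetD cur (cj.2 : Int) 0 + 1
  let substitutions := PySem.List.pyGetD prev (cj.2 : Int) 0 + (if c1 ≠ cj.1 then 1 else 0)
  cur ++ [min (min insertions deletions) substitutions]

-- A's outer loop body: 'for i, c1 in enumerate(s1): current_row = [i + 1]; ...; previous_row = current_row'
def outerStepA (s2 : List Char) (prev : List Int) (ci : Char × Nat) : List Int :=
  s2.zipIdx.foldl (innerStepA prev ci.1) [(ci.2 : Int) + 1]

-- Python's levenshtein_distance: the two-row DP.  The Python function first recurses once to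
-- swap the arguments when len(s1) < len(s2); after the swap the guard is false, so the single
-- swap is inlined in levA below as a top-level 'if' calling the loop body on the swapped pair.
def levRowsA (s1 s2 : List Char) : Int :=
  if s2.length = 0 then (s1.length : Int)
  else
    PySem.List.pyGetD
      (s1.zipIdx.foldl (outerStepA s2) (PySem.List.pyRange 0 ((s2.length : Int) + 1)))
      (-1) 0

def levA (s1 s2 : List Char) : Int :=
  if s1.length < s2.length then levRowsA s2 s1 else levRowsA s1 s2

def find_similar_values_py (input_value : String) (valid_values : List String) (max_distance : Int) : List String :=
  let input_lower := PySem.Str.lower input_value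
  let similar := valid_values.foldl (fun sim value =>
    let value_lower := PySem.Str.lower value
    let distance := levA input_lower.toList value_lower.toList
    if distance ≤ max_distance ∨ PySem.Str.isIn input_lower value_lower = true ∨
        PySem.Str.startswith value_lower input_lower = true
    then sim ++ [(value, distance)] else sim) ([] : List (String × Int))
  let sorted := PySem.List.sorted similar (fun x => x.2)
  (PySem.List.slice sorted none (some 5)).map (fun p => p.1)

-- ===== PORT B =====
-- B's inner loop body: one column updated in place, 'prev' holds the diagonal value.
def innerStepB (cj : Char × Nat) (st : Int × List Int) (ci : Char × Nat) : Int × List Int :=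
  let cur := min (min (PySem.List.pyGetD st.2 ((ci.2 : Int) + 1) 0 + 1)
                      (PySem.List.pyGetD st.2 (ci.2 : Int) 0 + 1))
                 (st.1 + (if ci.1 ≠ cj.1 then 1 else 0))
  (PySem.List.pyGetD st.2 ((ci.2 : Int) + 1) 0, PySem.List.pySetD st.2 ((ci.2 : Int) + 1) cur)

-- B's outer loop body: 'prev = col[0]; col[0] = j + 1; for i, ca in enumerate(a): ...'
def outerStepB (a : List Char) (col : List Int) (cj : Char × Nat) : List Int :=
  let prev := PySem.List.pyGetD col 0 0
  let col1 := PySem.List.pySetD col 0 ((cj.2 : Int) + 1)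
  (a.zipIdx.foldl (innerStepB cj) (prev, col1)).2

def distB (a b : List Char) : Int :=
  PySem.List.pyGetD
    (b.zipIdx.foldl (outerStepB a) (PySem.List.pyRange 0 ((a.length : Int) + 1)))
    (-1) 0

def find_similar_values_py_alt (input_value : String) (valid_values : List String) (max_distance : Int) : List String :=
  let input_lower := PySem.Str.lower input_value
  let st := valid_values.foldl (fun (st : List (String × Int) × Int) value =>
    let value_lower := PySem.Str.lower value
    let d := distB input_lower.toList value_lower.toList
    if d ≤ max_distance ∨ PySem.Str.isIn input_lower value_lower = true ∨
        PySem.Str.startswith value_lower input_lower = true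
    then (st.1 ++ [(value, d)], max st.2 d) else st) (([] : List (String × Int)), (0 : Int))
  let result := (PySem.List.pyRange 0 (st.2 + 1)).foldl (fun res d =>
    st.1.foldl (fun res2 p => if p.2 = d then res2 ++ [p.1] else res2) res) ([] : List String)
  PySem.List.slice result none (some 5)

-- ===== PRECONDITION & SPEC =====
def Spec_find_similar_values_py (input_value : String) (valid_values : List String) (max_distance : Int) (out : List String) : Prop := out = find_similar_values_py_alt input_value valid_values max_distance
instance (input_value : String) (valid_values : List String) (max_distance : Int) (out : List String) : Decidable (Spec_find_similar_values_py input_value valid_values max_distance out) := by unfold Spec_find_similar_values_py; infer_instance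

-- ===== CLAIM (what is proved, stated in full; the proofs are below) =====
def Claim_equal_find_similar_values_py : Prop := ∀ (input_value : String) (valid_values : List String) (max_distance : Int), Dom_find_similar_values_py input_value valid_values max_distance → Spec_find_similar_values_py input_value valid_values max_distance (find_similar_values_py input_value valid_values max_distance)

-- ===== LEMMAS AND PROOFS =====

-- Reference prefix edit distance: edE f g i j is the edit distance between the length-i prefix
-- read through f and the length-j prefix read through g.
def edE (f g : Nat → Char) : Nat → Nat → Int
  | 0, j => (j : Int)
  | (i+1), 0 => ((i : Int) + 1)
  | (i+1), (j+1) =>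
      min (min (edE f g i (j+1) + 1) (edE f g (i+1) j + 1))
          (edE f g i j + (if f i ≠ g j then 1 else 0))

lemma edE_zero_right (f g : Nat → Char) (i : Nat) : edE f g i 0 = (i : Int) := by
  cases i <;> simp [edE]

lemma edE_nonneg (f g : Nat → Char) : ∀ i j, 0 ≤ edE f g i j
  | 0, j => by simp [edE]
  | (i+1), 0 => by simp [edE]; positivity
  | (i+1), (j+1) => by
      have h1 := edE_nonneg f g i (j+1)
      have h2 := edE_nonneg f g (i+1) j
      have h3 := edE_nonneg f g i j
      simp only [edE]
      split <;> omega

lemma edE_symm (f g : Nat → Char) : ∀ i j, edE f g i j = edE g f j i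
  | 0, j => by simp [edE, edE_zero_right]
  | (i+1), 0 => by simp [edE, edE_zero_right]
  | (i+1), (j+1) => by
      have h1 := edE_symm f g i (j+1)
      have h2 := edE_symm f g (i+1) j
      have h3 := edE_symm f g i j
      have hc : (if f i ≠ g j then (1:Int) else 0) = (if g j ≠ f i then (1:Int) else 0) := by
        by_cases h : f i = g j <;> simp [h, Ne, eq_comm]
      simp only [edE, h1, h2, h3, hc]
      omega

def gch (s : List Char) (k : Nat) : Char := s.getD k ' '

lemma gch_get (s : List Char) (k : Nat) (hk : k < s.length) : s[k] = gch s k := by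
  simp [gch, List.getD_eq_getElem?_getD, List.getElem?_eq_getElem hk]

lemma zipIdx_take_succ {α : Type} (l : List α) (k : Nat) (hk : k < l.length) :
    (l.take (k+1)).zipIdx = (l.take k).zipIdx ++ [(l[k], k)] := by
  rw [List.take_add_one, List.zipIdx_append]
  simp [List.getElem?_eq_getElem hk, Nat.min_eq_left (le_of_lt hk), List.zipIdx]

lemma pyGetD_neg_one_map_range (h : Nat → Int) (n : Nat) :
    PySem.List.pyGetD ((List.range (n+1)).map h) (-1) 0 = h n := by
  have hne : ((List.range (n+1)).map h) ≠ [] := by simp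
  rw [PySem.List.pyGetD_neg_one _ _ hne, List.getLast_eq_getElem]
  simp

lemma pyGetD_map_range (h : Nat → Int) (n k : Nat) (hk : k < n) :
    PySem.List.pyGetD ((List.range n).map h) ((k : Nat) : Int) 0 = h k := by
  rw [PySem.List.pyGetD_natCast]
  exact PySem.List.getD_map_range h n k 0 hk

lemma set_map_range (h : Nat → Int) (n m : Nat) (v : Int) (_hm : m < n) :
    ((List.range n).map h).set m v = (List.range n).map (fun k => if k = m then v else h k) := by
  apply List.ext_getElem
  · simp
  · intro i h1 h2
    simp only [List.getElem_set, List.getElem_map, List.getElem_range]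
    simp only [List.length_set, List.length_map, List.length_range] at h1
    split <;> split <;> first | rfl | omega

-- ===== the A-side loop invariant: the two-row DP computes edE row by row =====
lemma innerA (f g : Nat → Char) (i : Nat) (c1 : Char) (hc : c1 = f i)
    (s2 : List Char) (hg : ∀ k (h : k < s2.length), s2[k] = g k) :
    ∀ k, k ≤ s2.length →
      ((s2.take k).zipIdx).foldl
        (innerStepA ((List.range (s2.length+1)).map (fun j => edE f g i j)) c1)
        [(i : Int) + 1]
      = (List.range (k+1)).map (fun j => edE f g (i+1) j) := by
  intro k
  induction k with
  | zero =>
    intro _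
    simp [List.range_succ, edE_zero_right]
  | succ k ih =>
    intro hk1
    have hk : k < s2.length := by omega
    rw [zipIdx_take_succ s2 k hk, List.foldl_append, ih (by omega)]
    simp only [List.foldl_cons, List.foldl_nil]
    rw [List.range_succ (n := k+1), List.map_append]
    unfold innerStepA
    simp only []
    have hcast : ((k : Nat) : Int) + 1 = (((k+1 : Nat) : Nat) : Int) := by push_cast; ring
    rw [hcast, pyGetD_map_range _ _ _ (by omega), pyGetD_map_range _ _ _ (by omega),
        pyGetD_map_range _ _ _ (by omega)]
    have hstep : min (min (edE f g i (k+1) + 1) (edE f g (i+1) k + 1))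
        (edE f g i k + if c1 ≠ (s2[k], k).1 then (1:Int) else 0) = edE f g (i+1) (k+1) := by
      have h1 : (s2[k], k).1 = g k := by simpa using hg k hk
      rw [h1, hc]
      simp [edE]
    rw [hstep]
    simp

lemma outerA (f g : Nat → Char) (s1 s2 : List Char)
    (hf : ∀ k (h : k < s1.length), s1[k] = f k)
    (hg : ∀ k (h : k < s2.length), s2[k] = g k) :
    ∀ m, m ≤ s1.length →
      ((s1.take m).zipIdx).foldl (outerStepA s2)
        ((List.range (s2.length+1)).map (fun j => edE f g 0 j))
      = (List.range (s2.length+1)).map (fun j => edE f g m j) := by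
  intro m
  induction m with
  | zero => intro _; simp
  | succ m ih =>
    intro hm1
    have hm : m < s1.length := by omega
    rw [zipIdx_take_succ s1 m hm, List.foldl_append, ih (by omega)]
    simp only [List.foldl_cons, List.foldl_nil]
    unfold outerStepA
    have := innerA f g m (s1[m]) (hf m hm) s2 hg s2.length (le_refl _)
    rw [List.take_length] at this
    exact this

lemma levRowsA_eq (s1 s2 : List Char) :
    levRowsA s1 s2 = edE (gch s1) (gch s2) s1.length s2.length := by
  unfold levRowsA
  by_cases h0 : s2.length = 0
  · rw [if_pos h0, h0, edE_zero_right]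
  · rw [if_neg h0]
    have hinit : PySem.List.pyRange 0 ((s2.length : Int) + 1)
        = (List.range (s2.length+1)).map (fun j => edE (gch s1) (gch s2) 0 j) := by
      rw [PySem.List.pyRange_zero]
      have : (((s2.length : Int)) + 1).toNat = s2.length + 1 := by omega
      rw [this]
      apply List.map_congr_left
      intro j _
      simp [edE]
    rw [hinit]
    have := outerA (gch s1) (gch s2) s1 s2 (fun k h => gch_get s1 k h) (fun k h => gch_get s2 k h)
      s1.length (le_refl _)
    rw [List.take_length] at this
    rw [this, pyGetD_neg_one_map_range]

-- ===== the B-side loop invariant: the in-place column computes edE column by column =====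
lemma innerB (f g : Nat → Char) (j : Nat) (c2 : Char) (hc : c2 = g j)
    (a : List Char) (hf : ∀ k (h : k < a.length), a[k] = f k) :
    ∀ t, t ≤ a.length →
      ((a.take t).zipIdx).foldl (innerStepB (c2, j))
        (edE f g 0 j, (List.range (a.length+1)).map (fun k => if k ≤ 0 then edE f g k (j+1) else edE f g k j))
      = (edE f g t j,
         (List.range (a.length+1)).map (fun k => if k ≤ t then edE f g k (j+1) else edE f g k j)) := by
  intro t
  induction t with
  | zero => intro _; simp
  | succ t ih =>
    intro ht1
    have ht : t < a.length := by omega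
    rw [zipIdx_take_succ a t ht, List.foldl_append, ih (by omega)]
    simp only [List.foldl_cons, List.foldl_nil]
    unfold innerStepB
    simp only []
    have hcast : ((t : Nat) : Int) + 1 = (((t+1 : Nat) : Nat) : Int) := by push_cast; ring
    rw [hcast, pyGetD_map_range _ _ _ (by omega), pyGetD_map_range _ _ _ (by omega)]
    have e1 : (if t + 1 ≤ t then edE f g (t+1) (j+1) else edE f g (t+1) j) = edE f g (t+1) j := by
      rw [if_neg (by omega)]
    have e2 : (if t ≤ t then edE f g t (j+1) else edE f g t j) = edE f g t (j+1) := by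
      rw [if_pos (le_refl t)]
    rw [e1, e2]
    congr 1
    rw [PySem.List.pySetD_natCast, set_map_range _ _ _ _ (by omega)]
    apply List.map_congr_left
    intro k _
    rw [hf t ht, hc]
    by_cases hk : k = t + 1
    · subst hk
      rw [if_pos (show (t+1 : Nat) = t+1 from rfl), if_pos (show t+1 ≤ t+1 from le_refl _)]
      simp only [edE]
      rw [min_comm (edE f g (t+1) j + 1) (edE f g t (j+1) + 1)]
    · rw [if_neg hk]
      by_cases hk2 : k ≤ t
      · rw [if_pos hk2, if_pos (show k ≤ t+1 from by omega)]
      · rw [if_neg hk2, if_neg (show ¬ k ≤ t+1 from by omega)]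

lemma outerB (f g : Nat → Char) (a b : List Char)
    (hf : ∀ k (h : k < a.length), a[k] = f k)
    (hg : ∀ k (h : k < b.length), b[k] = g k) :
    ∀ m, m ≤ b.length →
      ((b.take m).zipIdx).foldl (outerStepB a)
        ((List.range (a.length+1)).map (fun k => edE f g k 0))
      = (List.range (a.length+1)).map (fun k => edE f g k m) := by
  intro m
  induction m with
  | zero => intro _; simp
  | succ m ih =>
    intro hm1
    have hm : m < b.length := by omega
    rw [zipIdx_take_succ b m hm, List.foldl_append, ih (by omega)]
    simp only [List.foldl_cons, List.foldl_nil]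
    unfold outerStepB
    simp only []
    have hprev : PySem.List.pyGetD ((List.range (a.length+1)).map (fun k => edE f g k m)) 0 0
        = edE f g 0 m := by
      rw [show (0:Int) = ((0:Nat):Int) from rfl]
      exact pyGetD_map_range _ _ _ (by omega)
    rw [hprev]
    have hset : PySem.List.pySetD ((List.range (a.length+1)).map (fun k => edE f g k m)) 0 ((m : Int) + 1)
        = (List.range (a.length+1)).map (fun k => if k ≤ 0 then edE f g k (m+1) else edE f g k m) := by
      have h0 : ((0 : Nat) : Int) = (0 : Int) := rfl
      rw [← h0, PySem.List.pySetD_natCast, set_map_range _ _ _ _ (by omega)]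
      apply List.map_congr_left
      intro k _
      by_cases hk : k = 0
      · subst hk
        rw [if_pos (show (0:Nat) = 0 from rfl), if_pos (show (0:Nat) ≤ 0 from le_refl _)]
        simp [edE]
      · rw [if_neg hk, if_neg (show ¬ k ≤ 0 from by omega)]
    rw [hset]
    have := innerB f g m (b[m]) (hg m hm) a hf a.length (le_refl _)
    rw [List.take_length] at this
    rw [this]
    apply List.map_congr_left
    intro k hk
    rw [if_pos (by simp at hk; omega)]

lemma distB_eq (a b : List Char) :
    distB a b = edE (gch a) (gch b) a.length b.length := by
  unfold distB
  have hinit : PySem.List.pyRange 0 ((a.length : Int) + 1)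
      = (List.range (a.length+1)).map (fun k => edE (gch a) (gch b) k 0) := by
    rw [PySem.List.pyRange_zero]
    have : (((a.length : Int)) + 1).toNat = a.length + 1 := by omega
    rw [this]
    apply List.map_congr_left
    intro k _
    rw [edE_zero_right]
  rw [hinit]
  have := outerB (gch a) (gch b) a b (fun k h => gch_get a k h) (fun k h => gch_get b k h)
    b.length (le_refl _)
  rw [List.take_length] at this
  rw [this, pyGetD_neg_one_map_range]

lemma levA_eq_distB (s t : List Char) : levA s t = distB s t := by
  unfold levA
  rw [distB_eq]
  by_cases h : s.length < t.length
  · rw [if_pos h, levRowsA_eq, edE_symm]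
  · rw [if_neg h, levRowsA_eq]

-- ===== counting buckets = stable sort by an Int key =====
lemma insertBy_cons_true {α : Type} (before : α → α → Bool) (x y : α) (ys : List α)
    (h : before x y = true) : PySem.List.insertBy before x (y :: ys) = x :: y :: ys := by
  simp [PySem.List.insertBy, h]

lemma insertBy_all_true {α : Type} (before : α → α → Bool) (x : α) (l : List α)
    (h : ∀ z ∈ l, before x z = true) : PySem.List.insertBy before x l = x :: l := by
  cases l with
  | nil => simp [PySem.List.insertBy]
  | cons y ys => exact insertBy_cons_true before x y ys (h y (List.mem_cons_self))

lemma insertBy_append_left {α : Type} (before : α → α → Bool) (x : α) (l1 l2 : List α)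
    (h : ∀ y ∈ l1, before x y = false) :
    PySem.List.insertBy before x (l1 ++ l2) = l1 ++ PySem.List.insertBy before x l2 := by
  induction l1 with
  | nil => simp
  | cons y ys ih =>
    have hy := h y (List.mem_cons_self)
    simp only [List.cons_append]
    rw [show PySem.List.insertBy before x (y :: (ys ++ l2))
        = if before x y then x :: y :: (ys ++ l2) else y :: PySem.List.insertBy before x (ys ++ l2)
        from by simp [PySem.List.insertBy]]
    rw [hy]
    simp only [Bool.false_eq_true, if_false]
    rw [ih (fun z hz => h z (List.mem_cons_of_mem _ hz))]

lemma insertBy_flatMap {α : Type} (x : α × Int) :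
    ∀ (ks : List Int) (xs : List (α × Int)), ks.Pairwise (· < ·) → x.2 ∈ ks →
      PySem.List.insertBy (fun a b => decide (a.2 < b.2)) x
        (ks.flatMap (fun k => xs.filter (fun p => decide (p.2 = k))))
      = ks.flatMap (fun k => (xs ++ [x]).filter (fun p => decide (p.2 = k))) := by
  intro ks
  induction ks with
  | nil => intro xs _ hx; simp at hx
  | cons k ks ih =>
    intro xs hp hx
    have hlt : ∀ k' ∈ ks, k < k' := (List.pairwise_cons.mp hp).1
    have hp' : ks.Pairwise (· < ·) := (List.pairwise_cons.mp hp).2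
    simp only [List.flatMap_cons]
    by_cases hxk : x.2 = k
    · -- x belongs to the head bucket: it goes to the end of that bucket
      have hbucket : ∀ y ∈ xs.filter (fun p => decide (p.2 = k)),
          (fun a b => decide (a.2 < b.2)) x y = false := by
        intro y hy
        have : y.2 = k := by simpa using (List.mem_filter.mp hy).2
        simp [this, hxk]
      rw [insertBy_append_left _ _ _ _ hbucket]
      have hrest : ∀ z ∈ ks.flatMap (fun k => xs.filter (fun p => decide (p.2 = k))),
          (fun a b => decide (a.2 < b.2)) x z = true := by
        intro z hz
        obtain ⟨k', hk', hz'⟩ := List.mem_flatMap.mp hz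
        have hz2 : z.2 = k' := by simpa using (List.mem_filter.mp hz').2
        have : k < k' := hlt k' hk'
        simp [hz2, hxk]
        omega
      rw [insertBy_all_true _ _ _ hrest]
      rw [List.filter_append]
      have : [x].filter (fun p => decide (p.2 = k)) = [x] := by simp [hxk]
      rw [this]
      have hrest2 : ks.flatMap (fun k' => (xs ++ [x]).filter (fun p => decide (p.2 = k')))
          = ks.flatMap (fun k' => xs.filter (fun p => decide (p.2 = k'))) := by
        apply List.flatMap_congr  -- pointwise on members
        intro k' hk'
        rw [List.filter_append]
        have : [x].filter (fun p => decide (p.2 = k')) = [] := by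
          have : k < k' := hlt k' hk'
          simp [hxk]
          omega
        rw [this, List.append_nil]
      rw [hrest2]
      simp
    · -- x belongs to a later bucket
      have hx' : x.2 ∈ ks := by
        cases List.mem_cons.mp hx with
        | inl h => exact absurd h hxk
        | inr h => exact h
      have hkx : k < x.2 := hlt _ hx'
      have hbucket : ∀ y ∈ xs.filter (fun p => decide (p.2 = k)),
          (fun a b => decide (a.2 < b.2)) x y = false := by
        intro y hy
        have : y.2 = k := by simpa using (List.mem_filter.mp hy).2
        simp [this]
        omega
      rw [insertBy_append_left _ _ _ _ hbucket, ih xs hp' hx']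
      have : (xs ++ [x]).filter (fun p => decide (p.2 = k)) = xs.filter (fun p => decide (p.2 = k)) := by
        rw [List.filter_append]
        have : [x].filter (fun p => decide (p.2 = k)) = [] := by simp [hxk]
        rw [this, List.append_nil]
      rw [this]

lemma sorted_eq_flatMap_filter {α : Type} (xs : List (α × Int)) (ks : List Int)
    (hks : ks.Pairwise (· < ·)) (hmem : ∀ p ∈ xs, p.2 ∈ ks) :
    PySem.List.sorted xs (fun p => p.2) =
      ks.flatMap (fun k => xs.filter (fun p => decide (p.2 = k))) := by
  induction xs using List.reverseRecOn with
  | nil => simp [PySem.List.sorted_eq_foldl_insertBy]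
  | append_singleton xs x ih =>
    rw [PySem.List.sorted_eq_foldl_insertBy, List.foldl_append]
    simp only [List.foldl_cons, List.foldl_nil]
    rw [← PySem.List.sorted_eq_foldl_insertBy]
    rw [ih (fun p hp => hmem p (List.mem_append_left _ hp))]
    exact insertBy_flatMap x ks xs hks (hmem x (List.mem_append_right _ (List.mem_singleton.mpr rfl)))

-- ===== the accumulating fold of B's outer loop =====
lemma bfold {α β : Type} (cond : α → Prop) [DecidablePred cond] (pf : α → β × Int) :
    ∀ (l : List α) (acc : List (β × Int)) (m : Int),
      (l.foldl (fun st v => if cond v then (st.1 ++ [pf v], max st.2 (pf v).2) else st) (acc, m))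
      = (acc ++ (l.filter (fun v => decide (cond v))).map pf,
         ((l.filter (fun v => decide (cond v))).map pf).foldl (fun mm p => max mm p.2) m) := by
  intro l
  induction l with
  | nil => intro acc m; simp
  | cons v vs ih =>
    intro acc m
    simp only [List.foldl_cons, List.filter_cons]
    by_cases hv : cond v
    · rw [if_pos hv]
      rw [ih (acc ++ [pf v]) (max m (pf v).2)]
      simp [hv]
    · rw [if_neg hv]
      rw [ih acc m]
      simp [hv]

-- ===== VERDICT (by name: the statement is the Claim_ definition above) =====
theorem find_similar_values_py_spec : Claim_equal_find_similar_values_py := by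
  intro iv vv md _
  unfold Spec_find_similar_values_py find_similar_values_py find_similar_values_py_alt
  simp only [levA_eq_distB]
  rw [PySem.List.foldl_append_ite
      (p := fun value => distB (PySem.Str.lower iv).toList (PySem.Str.lower value).toList ≤ md ∨
        PySem.Str.isIn (PySem.Str.lower iv) (PySem.Str.lower value) = true ∨
        PySem.Str.startswith (PySem.Str.lower value) (PySem.Str.lower iv) = true)
      (f := fun value => (value, distB (PySem.Str.lower iv).toList (PySem.Str.lower value).toList))]
  rw [bfold
      (cond := fun value => distB (PySem.Str.lower iv).toList (PySem.Str.lower value).toList ≤ md ∨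
        PySem.Str.isIn (PySem.Str.lower iv) (PySem.Str.lower value) = true ∨
        PySem.Str.startswith (PySem.Str.lower value) (PySem.Str.lower iv) = true)
      (pf := fun value => (value, distB (PySem.Str.lower iv).toList (PySem.Str.lower value).toList))
      vv [] 0]
  simp only [List.nil_append]
  -- abbreviations
  set M := ((vv.filter (fun value => decide (distB (PySem.Str.lower iv).toList (PySem.Str.lower value).toList ≤ md ∨
        PySem.Str.isIn (PySem.Str.lower iv) (PySem.Str.lower value) = true ∨
        PySem.Str.startswith (PySem.Str.lower value) (PySem.Str.lower iv) = true))).map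
      (fun value => (value, distB (PySem.Str.lower iv).toList (PySem.Str.lower value).toList))) with hM
  set mx := M.foldl (fun mm p => max mm p.2) 0 with hmx
  -- the B-side buckets
  have hfun : (fun (res : List String) (d : Int) =>
        M.foldl (fun res2 p => if p.2 = d then res2 ++ [p.1] else res2) res)
      = (fun res d => res ++ (M.filter (fun p => decide (p.2 = d))).map (fun p => p.1)) := by
    funext res d
    exact PySem.List.foldl_append_ite (fun p => p.2 = d) (fun p => p.1) M res
  rw [hfun, PySem.List.foldl_append_eq_flatMap
      (fun d => (M.filter (fun p => decide (p.2 = d))).map (fun p => p.1)) _ []]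
  simp only [List.nil_append]
  rw [← List.map_flatMap]
  -- key facts about the distances in M
  have hmax := PySem.List.le_foldl_max_int M (fun p => p.2) 0
  have hnn : ∀ p ∈ M, 0 ≤ p.2 := by
    intro p hp
    rw [hM] at hp
    obtain ⟨v, _, rfl⟩ := List.mem_map.mp hp
    simp only [distB_eq]
    exact edE_nonneg _ _ _ _
  have hmem : ∀ p ∈ M, p.2 ∈ PySem.List.pyRange 0 (mx + 1) := by
    intro p hp
    rw [PySem.List.mem_pyRange_one]
    refine ⟨hnn p hp, ?_⟩
    have := hmax.2 p hp
    omega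
  rw [← sorted_eq_flatMap_filter M (PySem.List.pyRange 0 (mx + 1))
      (PySem.List.pairwise_lt_pyRange_one 0 (mx + 1)) hmem]
  rw [PySem.List.slice_to _ (by norm_num : (0:Int) ≤ 5),
      PySem.List.slice_to _ (by norm_num : (0:Int) ≤ 5)]
  rw [List.map_take]
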